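-- pv_equiv track=rewrite | github.com/WieniawaD/sudoku_solver | su_solver_072.py | generate_squares
-- ===== SOURCE A (Python) =====
-- def generate_squares(size=9,sq_s=3):
--     #returns coordinates of points in 9 subsquares 3x3
--     sq_size =[]
--     while sq_s <= size:
--         sq_size.append(sq_s)
--         sq_s = sq_s  +3
--     sqs = []
--     for x in sq_size:
--         for y in sq_size:
--             sq=[]
--             for r in range(x-3,x):
--                 for c in range(y-3,y):
--                     sq.append([r,c])
--             sqs.append(sq)
--     return sqs
-- ===== SOURCE B (Python) =====
-- def generate_squares(size=9, sq_s=3):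
--     # Single sweep over the covered region, distributing each cell into its
--     # block's bucket, instead of A's per-block nested loops.
--     if sq_s > size:
--         return []
--     n = (size - sq_s) // 3 + 1
--     off = sq_s - 3
--     blocks = [[] for _ in range(n * n)]
--     for r in range(off, off + 3 * n):
--         for c in range(off, off + 3 * n):
--             blocks[((r - off) // 3) * n + (c - off) // 3].append([r, c])
--     return blocks
-- ===== Notes on version B (the rewrite author's own statement) =====
-- stated objective: alternative
-- what changed: B replaces A's while-loop over block starts plus four nested per-block loops by a closed-form block count and a single sweep over all covered cells that distributes each cell into its block's pre-allocated bucket by index arithmetic.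
import Mathlib
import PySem

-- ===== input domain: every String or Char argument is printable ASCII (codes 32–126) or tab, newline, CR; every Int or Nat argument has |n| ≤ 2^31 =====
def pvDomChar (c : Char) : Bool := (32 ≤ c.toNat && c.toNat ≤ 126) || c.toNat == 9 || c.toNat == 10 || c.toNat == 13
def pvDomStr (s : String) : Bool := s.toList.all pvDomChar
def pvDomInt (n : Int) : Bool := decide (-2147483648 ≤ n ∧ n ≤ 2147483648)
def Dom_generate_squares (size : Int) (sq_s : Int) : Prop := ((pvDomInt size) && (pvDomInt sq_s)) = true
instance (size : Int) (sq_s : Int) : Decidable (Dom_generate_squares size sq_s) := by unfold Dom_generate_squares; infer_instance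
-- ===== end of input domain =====

-- B distributes every covered cell into its block's bucket in one sweep (with a closed-form
-- block count) instead of A's while-loop over block starts plus nested per-block loops; an
-- alternative decomposition of the same cost, return value proved identical on all inputs.

-- ===== PORT A =====
-- the while loop collecting the block end columns sq_s, sq_s+3, … ≤ size

def buildSqSize (size : Int) (sq_s : Int) : List Int :=
  if _h : sq_s ≤ size then sq_s :: buildSqSize size (sq_s + 3) else []
termination_by (size + 1 - sq_s).toNat
decreasing_by omega

def generate_squares (size : Int) (sq_s : Int) : List (List (List Int)) :=
  let sq_size := buildSqSize size sq_s
  sq_size.flatMap (fun x =>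
    sq_size.map (fun y =>
      (PySem.List.pyRange (x - 3) x 1).flatMap (fun r =>
        (PySem.List.pyRange (y - 3) y 1).map (fun c => [r, c]))))

-- ===== PORT B =====
def generate_squares_alt (size : Int) (sq_s : Int) : List (List (List Int)) :=
  if size < sq_s then []
  else
    let n : Int := PySem.Int.floordiv (size - sq_s) 3 + 1
    let off : Int := sq_s - 3
    let blocks : List (List (List Int)) := List.replicate (n * n).toNat []
    (PySem.List.pyRange off (off + 3 * n) 1).foldl (fun bl r =>
      (PySem.List.pyRange off (off + 3 * n) 1).foldl (fun bl c =>
        bl.modify (PySem.Int.floordiv (r - off) 3 * n + PySem.Int.floordiv (c - off) 3).toNat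
          (fun b => b ++ [[r, c]])) bl) blocks

-- flatten the nested row/column folds into one fold over the (row, column) pairs

-- ===== PRECONDITION & SPEC =====
def Spec_generate_squares (size : Int) (sq_s : Int) (out : List (List (List Int))) : Prop := out = generate_squares_alt size sq_s
instance (size : Int) (sq_s : Int) (out : List (List (List Int))) : Decidable (Spec_generate_squares size sq_s out) := by unfold Spec_generate_squares; infer_instance

-- ===== CLAIM (what is proved, stated in full; the proofs are below) =====
def Claim_equal_generate_squares : Prop := ∀ (size : Int) (sq_s : Int), Dom_generate_squares size sq_s → Spec_generate_squares size sq_s (generate_squares size sq_s)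

-- ===== LEMMAS AND PROOFS =====

-- common normal form: the n*n blocks in block-row-major order, cells row-major inside a block

def blockCells (a : Int) (b : Int) : List (List Int) :=
  [a, a+1, a+2].flatMap (fun r => [b, b+1, b+2].map (fun c => [r, c]))

def normalForm (off : Int) (n : Nat) : List (List (List Int)) :=
  (List.range (n * n)).map (fun i => blockCells (off + 3 * ((i / n : Nat) : Int)) (off + 3 * ((i % n : Nat) : Int)))

theorem buildSqSize_eq (m : Nat) : ∀ (size sq_s : Int), sq_s ≤ size → (size - sq_s).toNat / 3 = m →
    buildSqSize size sq_s = (List.range (m + 1)).map (fun k : Nat => sq_s + 3 * (k : Int)) := by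
  induction m with
  | zero =>
    intro size sq_s hle hm
    rw [buildSqSize, dif_pos hle, buildSqSize, dif_neg (by omega)]
    norm_num [List.range_succ]
  | succ m ih =>
    intro size sq_s hle hm
    rw [buildSqSize, dif_pos hle, ih size (sq_s + 3) (by omega) (by omega)]
    conv_rhs => rw [List.range_succ_eq_map]
    simp only [List.map_cons, List.map_map, Function.comp_def]
    refine List.cons_eq_cons.mpr ⟨by push_cast; ring, ?_⟩
    apply List.map_congr_left
    intro k _; push_cast [Nat.succ_eq_add_one]; ring

theorem pyRange3 (x : Int) : PySem.List.pyRange (x - 3) x 1 = [x - 3, x - 2, x - 1] := by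
  rw [PySem.List.pyRange_one]
  have h3 : (x - (x - 3)).toNat = 3 := by omega
  rw [h3]
  norm_num [List.range_succ]
  omega

theorem list3 (a x : Int) (h : x - 3 = a) : [x - 3, x - 2, x - 1] = [a, a+1, a+2] := by
  simp only [List.cons.injEq, and_true]
  refine ⟨by omega, by omega, by omega⟩

theorem grid_eq {α : Type} (g : Nat → Nat → α) (n : Nat) : ∀ (m : Nat),
    (List.range m).flatMap (fun q => (List.range n).map (fun j => g q j))
      = (List.range (m * n)).map (fun i => g (i / n) (i % n)) := by
  intro m
  induction m with
  | zero => simp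
  | succ m ih =>
    rw [List.range_succ, List.flatMap_append, ih, Nat.succ_mul, List.range_add, List.map_append]
    simp only [List.flatMap_cons, List.flatMap_nil, List.append_nil, List.map_map]
    congr 1
    apply List.map_congr_left
    intro k hk
    have hkn : k < n := List.mem_range.mp hk
    have h1 : (m * n + k) / n = m := by
      rw [Nat.mul_comm m n, Nat.mul_add_div (by omega), Nat.div_eq_of_lt hkn]; omega
    have h2 : (m * n + k) % n = k := by
      rw [Nat.mul_comm m n, Nat.mul_add_mod]
      exact Nat.mod_eq_of_lt hkn
    simp [h1, h2]

theorem blk_eq (sq_s : Int) (q j : Nat) :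
    (PySem.List.pyRange (sq_s + 3 * (q : Int) - 3) (sq_s + 3 * (q : Int)) 1).flatMap
      (fun r => (PySem.List.pyRange (sq_s + 3 * (j : Int) - 3) (sq_s + 3 * (j : Int)) 1).map
        (fun c => [r, c]))
      = blockCells ((sq_s - 3) + 3 * (q : Int)) ((sq_s - 3) + 3 * (j : Int)) := by
  rw [pyRange3, pyRange3, list3 ((sq_s - 3) + 3 * (j : Int)) _ (by ring),
      list3 ((sq_s - 3) + 3 * (q : Int)) _ (by ring)]
  rfl

theorem A_eq_nf (size sq_s : Int) (hle : sq_s ≤ size) :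
    generate_squares size sq_s = normalForm (sq_s - 3) ((size - sq_s).toNat / 3 + 1) := by
  show (buildSqSize size sq_s).flatMap _ = _
  rw [buildSqSize_eq ((size - sq_s).toNat / 3) size sq_s hle rfl]
  rw [List.flatMap_map]
  simp only [List.map_map, Function.comp_def, blk_eq]
  rw [grid_eq (fun q j => blockCells ((sq_s - 3) + 3 * (q : Int)) ((sq_s - 3) + 3 * (j : Int)))]
  rfl

theorem foldl_foldl_pairs {α β : Type} (h : β → α → α → β) (cols : List α) :
    ∀ (rows : List α) (b : β),
      rows.foldl (fun bl r => cols.foldl (fun bl c => h bl r c) bl) b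
        = (rows.flatMap (fun r => cols.map (fun c => (r, c)))).foldl (fun bl p => h bl p.1 p.2) b := by
  intro rows
  induction rows with
  | nil => intro b; simp
  | cons r rows ih =>
    intro b
    simp only [List.foldl_cons, List.flatMap_cons, List.foldl_append, ih, List.foldl_map]

theorem foldl_modify_getElem? {α γ : Type} (idx : α → Nat) (f : α → γ) (ps : List α) :
    ∀ (bl : List (List γ)) (i : Nat),
      (ps.foldl (fun bl p => bl.modify (idx p) (fun b => b ++ [f p])) bl)[i]?
        = (bl[i]?).map (fun b0 => b0 ++ (ps.filter (fun p => idx p == i)).map f) := by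
  induction ps with
  | nil => intro bl i; simp
  | cons p ps ih =>
    intro bl i
    simp only [List.foldl_cons, ih, List.getElem?_modify, List.filter_cons]
    by_cases hpi : idx p = i
    · simp [hpi]
      cases bl[i]? <;> simp
    · have : (idx p == i) = false := by simp [hpi]
      simp [hpi, this]

theorem rep_unique (n x y q j : Nat) (hy : y < n) (hj : j < n) (h : x * n + y = q * n + j) :
    x = q ∧ y = j := by
  have hn : 0 < n := by omega
  have h1 : (x * n + y) / n = x := by
    rw [Nat.mul_comm x n, Nat.mul_add_div hn, Nat.div_eq_of_lt hy]; omega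
  have h2 : (q * n + j) / n = q := by
    rw [Nat.mul_comm q n, Nat.mul_add_div hn, Nat.div_eq_of_lt hj]; omega
  have hxq : x = q := by rw [← h1, h, h2]
  refine ⟨hxq, ?_⟩
  subst hxq
  exact Nat.add_left_cancel h

theorem filter_eq_flatMap {β : Type} (p : β → Bool) (l : List β) :
    l.filter p = l.flatMap (fun b => if p b then [b] else []) := by
  induction l with
  | nil => rfl
  | cons b l ih => rw [List.filter_cons, List.flatMap_cons, ih]; by_cases h : p b <;> simp [h]

theorem flatMap_range3_if {β : Type} (g : Nat → List β) (q : Nat) : ∀ (n : Nat), q < n →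
    (List.range (3 * n)).flatMap (fun a => if a / 3 = q then g a else [])
      = g (3 * q) ++ g (3 * q + 1) ++ g (3 * q + 2) := by
  intro n
  induction n with
  | zero => omega
  | succ n ih =>
    intro hq
    have h3 : 3 * (n + 1) = 3 * n + 3 := by ring
    rw [h3, List.range_add, List.flatMap_append, List.flatMap_map]
    have hr3 : List.range 3 = [0, 1, 2] := by decide
    rw [hr3]
    by_cases hqn : q < n
    · rw [ih hqn]
      have e0 : (3 * n + 0) / 3 = n := by omega
      have e1 : (3 * n + 1) / 3 = n := by omega
      have e2 : (3 * n + 2) / 3 = n := by omega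
      simp only [List.flatMap_cons, List.flatMap_nil, e0, e1, e2,
        if_neg (by omega : ¬ n = q), List.append_nil]
    · have hq' : q = n := by omega
      subst hq'
      have hnil : (List.range (3 * q)).flatMap (fun a => if a / 3 = q then g a else []) = [] := by
        rw [List.flatMap_eq_nil_iff]
        intro a ha
        rw [if_neg (by have := List.mem_range.mp ha; omega)]
      have e0 : (3 * q + 0) / 3 = q := by omega
      have e1 : (3 * q + 1) / 3 = q := by omega
      have e2 : (3 * q + 2) / 3 = q := by omega
      simp only [hnil, List.nil_append, List.flatMap_cons, List.flatMap_nil, e0, e1, e2,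
        List.append_nil]
      simp [List.append_assoc]

theorem filter_range_div (n j : Nat) (hj : j < n) :
    (List.range (3 * n)).filter (fun b => b / 3 == j) = [3 * j, 3 * j + 1, 3 * j + 2] := by
  rw [filter_eq_flatMap]
  have conv1 : ∀ b : Nat, (if (b / 3 == j) = true then [b] else []) = (if b / 3 = j then [b] else []) := by
    intro b; by_cases h : b / 3 = j <;> simp [h]
  simp only [conv1]
  rw [flatMap_range3_if (fun b => [b]) j n hj]
  rfl

theorem pairs_filter_eq (n q j : Nat) (hq : q < n) (hj : j < n) :
    ((List.range (3 * n)).flatMap (fun a => (List.range (3 * n)).map (fun b => (a, b)))).filter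
        (fun p => p.1 / 3 * n + p.2 / 3 == q * n + j)
      = [(3*q, 3*j), (3*q, 3*j+1), (3*q, 3*j+2),
         (3*q+1, 3*j), (3*q+1, 3*j+1), (3*q+1, 3*j+2),
         (3*q+2, 3*j), (3*q+2, 3*j+1), (3*q+2, 3*j+2)] := by
  rw [List.filter_flatMap]
  have inner : ∀ a : Nat,
      ((List.range (3 * n)).map (fun b => (a, b))).filter (fun p => p.1 / 3 * n + p.2 / 3 == q * n + j)
        = if a / 3 = q then [(a, 3*j), (a, 3*j+1), (a, 3*j+2)] else [] := by
    intro a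
    rw [List.filter_map]
    by_cases ha : a / 3 = q
    · rw [if_pos ha]
      have hcong : ∀ b ∈ List.range (3 * n),
          ((fun p : Nat × Nat => p.1 / 3 * n + p.2 / 3 == q * n + j) ∘ (fun b => (a, b))) b
            = (fun b : Nat => b / 3 == j) b := by
        intro b _
        simp only [Function.comp_apply, ha]
        by_cases hbj : b / 3 = j
        · simp [hbj]
        · simp [hbj]
      rw [List.filter_congr hcong, filter_range_div n j hj]
      rfl
    · rw [if_neg ha]
      have : (List.range (3 * n)).filter
          ((fun p : Nat × Nat => p.1 / 3 * n + p.2 / 3 == q * n + j) ∘ (fun b => (a, b))) = [] := by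
        rw [List.filter_eq_nil_iff]
        intro b hb
        simp only [Function.comp_apply, beq_iff_eq]
        intro he
        have hbn : b / 3 < n := by have := List.mem_range.mp hb; omega
        exact ha (rep_unique n (a / 3) (b / 3) q j hbn hj he).1
      rw [this]
      rfl
  simp only [inner]
  rw [flatMap_range3_if (fun a => [(a, 3*j), (a, 3*j+1), (a, 3*j+2)]) q n hq]
  rfl

theorem B_core (mN : Nat) (off : Int) (hm : 0 < mN) :
    ((List.range (3 * mN)).map (fun k : Nat => off + (k : Int))).foldl (fun bl r =>
      ((List.range (3 * mN)).map (fun k : Nat => off + (k : Int))).foldl (fun bl c =>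
        bl.modify (PySem.Int.floordiv (r - off) 3 * ((mN : Nat) : Int) + PySem.Int.floordiv (c - off) 3).toNat
          (fun b => b ++ [[r, c]])) bl) (List.replicate (mN * mN) ([] : List (List Int)))
      = normalForm off mN := by
  rw [foldl_foldl_pairs (fun bl r c =>
    List.modify bl (PySem.Int.floordiv (r - off) 3 * ((mN : Nat) : Int)
      + PySem.Int.floordiv (c - off) 3).toNat (fun b => b ++ [[r, c]]))]
  apply List.ext_getElem?
  intro i
  rw [foldl_modify_getElem? (fun p : Int × Int =>
    (PySem.Int.floordiv (p.1 - off) 3 * ((mN : Nat) : Int) + PySem.Int.floordiv (p.2 - off) 3).toNat)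
    (fun p : Int × Int => [p.1, p.2])]
  have hps : ((List.range (3 * mN)).map (fun k : Nat => off + (k : Int))).flatMap
        (fun r => ((List.range (3 * mN)).map (fun k : Nat => off + (k : Int))).map (fun c => (r, c)))
      = ((List.range (3 * mN)).flatMap (fun a => (List.range (3 * mN)).map (fun b => (a, b)))).map
        (fun ab : Nat × Nat => (off + (ab.1 : Int), off + (ab.2 : Int))) := by
    rw [List.map_flatMap]
    simp only [List.flatMap_map, List.map_map]
    rfl
  rw [hps, List.filter_map]
  have hidx : ∀ a b : Nat,
      (PySem.Int.floordiv (off + (a : Int) - off) 3 * ((mN : Nat) : Int)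
        + PySem.Int.floordiv (off + (b : Int) - off) 3).toNat = a / 3 * mN + b / 3 := by
    intro a b
    rw [show off + (a : Int) - off = ((a : Nat) : Int) from by ring,
        show off + (b : Int) - off = ((b : Nat) : Int) from by ring,
        show PySem.Int.floordiv ((a : Nat) : Int) 3 = ((a / 3 : Nat) : Int)
          from by exact_mod_cast PySem.Int.floordiv_natCast a 3,
        show PySem.Int.floordiv ((b : Nat) : Int) 3 = ((b / 3 : Nat) : Int)
          from by exact_mod_cast PySem.Int.floordiv_natCast b 3,
        ← Nat.cast_mul, ← Nat.cast_add, Int.toNat_natCast]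
  have hpred : ((fun p : Int × Int =>
        (PySem.Int.floordiv (p.1 - off) 3 * ((mN : Nat) : Int)
          + PySem.Int.floordiv (p.2 - off) 3).toNat == i)
        ∘ (fun ab : Nat × Nat => (off + (ab.1 : Int), off + (ab.2 : Int))))
      = fun ab : Nat × Nat => ab.1 / 3 * mN + ab.2 / 3 == i := by
    funext ab
    simp only [Function.comp_apply]
    rw [hidx ab.1 ab.2]
  rw [hpred]
  by_cases hilt : i < mN * mN
  · have hq : i / mN < mN := (Nat.div_lt_iff_lt_mul hm).mpr hilt
    have hj : i % mN < mN := Nat.mod_lt _ hm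
    have hi : i = i / mN * mN + i % mN := by
      conv_lhs => rw [← Nat.div_add_mod i mN]
      ring
    rw [show (fun ab : Nat × Nat => ab.1 / 3 * mN + ab.2 / 3 == i)
          = (fun ab : Nat × Nat => ab.1 / 3 * mN + ab.2 / 3 == i / mN * mN + i % mN)
        from by rw [← hi]]
    rw [pairs_filter_eq mN (i / mN) (i % mN) hq hj]
    rw [List.getElem?_replicate, if_pos hilt]
    unfold normalForm
    rw [List.getElem?_map, List.getElem?_range hilt]
    simp only [Option.map_some, List.map_cons, List.map_nil, List.nil_append]
    congr 1
    simp only [blockCells, List.flatMap_cons, List.map_cons, List.map_nil, List.flatMap_nil,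
      List.append_nil, List.cons_append, List.nil_append]
    push_cast
    norm_num
    and_intros <;> ring
  · rw [List.getElem?_replicate, if_neg hilt, Option.map_none]
    symm
    rw [List.getElem?_eq_none_iff]
    unfold normalForm
    simp only [List.length_map, List.length_range]
    omega

theorem B_eq_nf (size sq_s : Int) (hle : sq_s ≤ size) :
    generate_squares_alt size sq_s = normalForm (sq_s - 3) ((size - sq_s).toNat / 3 + 1) := by
  have hfd : PySem.Int.floordiv (size - sq_s) 3 + 1 = ((((size - sq_s).toNat / 3 + 1 : Nat)) : Int) := by
    have h0 : size - sq_s = (((size - sq_s).toNat : Nat) : Int) := by omega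
    rw [h0]
    rw [show PySem.Int.floordiv (((size - sq_s).toNat : Nat) : Int) 3 = (((size - sq_s).toNat / 3 : Nat) : Int)
      from by exact_mod_cast PySem.Int.floordiv_natCast (size - sq_s).toNat 3]
    omega
  set mN : Nat := (size - sq_s).toNat / 3 + 1 with hmN
  unfold generate_squares_alt
  rw [if_neg (by omega)]
  show (PySem.List.pyRange (sq_s - 3) ((sq_s - 3) + 3 * (PySem.Int.floordiv (size - sq_s) 3 + 1)) 1).foldl
      (fun bl r =>
        (PySem.List.pyRange (sq_s - 3) ((sq_s - 3) + 3 * (PySem.Int.floordiv (size - sq_s) 3 + 1)) 1).foldl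
          (fun bl c =>
            bl.modify (PySem.Int.floordiv (r - (sq_s - 3)) 3 * (PySem.Int.floordiv (size - sq_s) 3 + 1)
                + PySem.Int.floordiv (c - (sq_s - 3)) 3).toNat
              (fun b => b ++ [[r, c]])) bl)
      (List.replicate (((PySem.Int.floordiv (size - sq_s) 3 + 1) * (PySem.Int.floordiv (size - sq_s) 3 + 1)).toNat) [])
      = normalForm (sq_s - 3) mN
  rw [hfd]
  have hrows : PySem.List.pyRange (sq_s - 3) ((sq_s - 3) + 3 * ((mN : Nat) : Int)) 1
      = (List.range (3 * mN)).map (fun k : Nat => (sq_s - 3) + (k : Int)) := by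
    rw [PySem.List.pyRange_one,
      show ((sq_s - 3) + 3 * ((mN : Nat) : Int) - (sq_s - 3)).toNat = 3 * mN from by omega]
  have hrepl : ((((mN : Nat) : Int)) * (((mN : Nat) : Int))).toNat = mN * mN := by
    rw [← Nat.cast_mul, Int.toNat_natCast]
  rw [hrows, hrepl]
  exact B_core mN (sq_s - 3) (by omega)

theorem A_empty (size sq_s : Int) (h : ¬ sq_s ≤ size) : generate_squares size sq_s = [] := by
  unfold generate_squares
  rw [buildSqSize, dif_neg h]
  rfl

theorem B_empty (size sq_s : Int) (h : ¬ sq_s ≤ size) : generate_squares_alt size sq_s = [] := by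
  unfold generate_squares_alt
  rw [if_pos (by omega)]

-- ===== VERDICT (by name: the statement is the Claim_ definition above) =====
theorem generate_squares_spec : Claim_equal_generate_squares := by
  intro size sq_s _
  unfold Spec_generate_squares
  by_cases hle : sq_s ≤ size
  · rw [A_eq_nf size sq_s hle, B_eq_nf size sq_s hle]
  · rw [A_empty size sq_s hle, B_empty size sq_s hle]
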